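-- pv_equiv track=rewrite | github.com/tyen-customs-a3/mission_dependency_checker | src/core/parser.py | _parse_array_items
-- ===== SOURCE A (Python) =====
-- from typing import Set, Dict, List, Optional, Tuple, Generator, DefaultDict
--
-- def _parse_array_items(content: str) -> List[str]:
--     """Parse array content with improved comma handling"""
--     items = []
--     current = []
--     in_quotes = False
--     in_comment = False
--     brace_level = 0
--
--     i = 0
--     while i < len(content):
--         char = content[i]
--
--         # Handle comments
--         if not in_quotes and char == '/' and i + 1 < len(content):
--             if content[i + 1] == '/':
--                 while i < len(content) and content[i] != '\n':
--                     i += 1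
--                 continue
--             elif content[i + 1] == '*':
--                 i += 2
--                 while i < len(content) and not (content[i-1:i+1] == '*/'):
--                     i += 1
--                 i += 1
--                 continue
--
--         # Handle quotes
--         if char == '"' and (i == 0 or content[i-1] != '\\'):
--             in_quotes = not in_quotes
--
--         # Handle braces and commas
--         elif not in_quotes:
--             if char == '{':
--                 brace_level += 1
--             elif char == '}':
--                 brace_level -= 1
--             # Split on comma at top level, ignoring trailing commas
--             elif char == ',' and brace_level == 0:
--                 item = ''.join(current).strip()
--                 # Only add non-empty items
--                 if item and not item.isspace():
--                     items.append(item)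
--                 current = []
--                 i += 1
--                 continue
--
--         current.append(char)
--         i += 1
--
--     # Handle final item, avoiding empty trailing items
--     if current:
--         item = ''.join(current).strip()
--         if item and not item.isspace() and not item.endswith(','):
--             items.append(item)
--
--     # Clean up items - remove trailing commas and whitespace
--     return [item.rstrip(',').strip() for item in items if item.rstrip(',').strip()]
-- ===== SOURCE B (Python) =====
-- from typing import List
--
--
-- def _parse_array_items(content: str) -> List[str]:
--     """Two-pass variant: lexer pass strips comments and annotates each kept
--     char with the in-quotes state; splitter pass cuts on top-level commas."""
--     n = len(content)
--
--     # Pass 1: drop comments, annotate every surviving char with in_quotes.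
--     ann = []
--     in_quotes = False
--     i = 0
--     while i < n:
--         c = content[i]
--         if not in_quotes and c == '/' and i + 1 < n:
--             nxt = content[i + 1]
--             if nxt == '/':
--                 while i < n and content[i] != '\n':
--                     i += 1
--                 continue
--             if nxt == '*':
--                 i += 2
--                 while i < n and content[i - 1:i + 1] != '*/':
--                     i += 1
--                 i += 1
--                 continue
--         if c == '"' and (i == 0 or content[i - 1] != '\\'):
--             in_quotes = not in_quotes
--         ann.append((c, in_quotes))
--         i += 1
--
--     # Pass 2: split the annotated stream on top-level commas.
--     pieces = []
--     cur = []
--     brace = 0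
--     for c, q in ann:
--         if not q and c == '{':
--             cur.append(c)
--             brace += 1
--         elif not q and c == '}':
--             cur.append(c)
--             brace -= 1
--         elif not q and c == ',' and brace == 0:
--             pieces.append(''.join(cur))
--             cur = []
--         else:
--             cur.append(c)
--
--     items = [p.strip() for p in pieces if p.strip()]
--     last = ''.join(cur).strip()
--     if last and not last.endswith(','):
--         items.append(last)
--     return [it.rstrip(',').strip() for it in items if it.rstrip(',').strip()]
-- ===== Notes on version B (the rewrite author's own statement) =====
-- stated objective: alternative
-- what changed: A's single fused scan (comments, quotes, braces, splitting and filtering interleaved in one loop with five state variables) is decomposed into two differently-shaped passes: a lexer that strips comments and annotates each surviving character with the in-quotes flag, then a fold over that annotated stream that tracks only the brace level and cuts raw pieces at top-level commas, with stripping/filtering applied afterwards on the piece list.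
import Mathlib
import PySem

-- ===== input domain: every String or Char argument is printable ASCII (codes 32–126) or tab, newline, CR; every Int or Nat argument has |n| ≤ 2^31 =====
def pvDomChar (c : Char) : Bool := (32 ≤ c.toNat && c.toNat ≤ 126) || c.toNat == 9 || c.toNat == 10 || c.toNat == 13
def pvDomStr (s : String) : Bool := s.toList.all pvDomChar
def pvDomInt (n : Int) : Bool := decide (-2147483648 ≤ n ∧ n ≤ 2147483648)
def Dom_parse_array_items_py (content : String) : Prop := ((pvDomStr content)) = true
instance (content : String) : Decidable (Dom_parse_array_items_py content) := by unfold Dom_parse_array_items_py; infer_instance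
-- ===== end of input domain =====

-- B decomposes A's fused scan into a comment-stripping/quote-annotating lexer pass
-- followed by a fold that splits on top-level commas (objective: alternative decomposition).


-- ===== PORT A =====
-- Strings are carried as List Char (PySem convention); String.ofList is applied at the boundary.

-- `while i < len(content) and content[i] != '\n': i += 1`  (the line-comment skip, shared verbatim by A and B)
def skipNL (cs : List Char) (i : Nat) : Nat :=
  if h : i < cs.length then
    if cs[i] = '\n' then i else skipNL cs (i + 1)
  else i
termination_by cs.length - i

-- `while i < len(content) and content[i-1:i+1] != '*/': i += 1` (block-comment skip; always called with i ≥ 2,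
-- where the two-char slice test is exactly cs[i-1] = '*' ∧ cs[i] = '/')
def skipBC (cs : List Char) (i : Nat) : Nat :=
  if h : i < cs.length then
    if cs.getD (i - 1) ' ' = '*' ∧ cs[i] = '/' then i else skipBC cs (i + 1)
  else i
termination_by cs.length - i

lemma skipNL_ge (cs : List Char) (i : Nat) : i ≤ skipNL cs i := by
  fun_induction skipNL with
  | case1 => omega
  | case2 => omega
  | case3 ih => omega

lemma skipBC_ge (cs : List Char) (i : Nat) : i ≤ skipBC cs i := by
  fun_induction skipBC with
  | case1 => omega
  | case2 => omega
  | case3 ih => omega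

lemma skipNL_gt (cs : List Char) (i : Nat) (h : i < cs.length) (hne : cs[i] ≠ '\n') :
    i < skipNL cs i := by
  rw [skipNL]
  simp only [h, dif_pos, if_neg hne]
  have := skipNL_ge cs (i + 1)
  omega

-- `it.rstrip(',')` — exact hand port (PySem has no right-only strip with a chars argument)
def rstripComma (s : List Char) : List Char :=
  (s.reverse.dropWhile (· = ',')).reverse

-- the main `while` loop of A, returning (items, current) at loop exit
def aLoop (cs : List Char) (i : Nat) (inq : Bool) (brace : Int)
    (cur : List Char) (items : List (List Char)) : List (List Char) × List Char :=
  if h : i < cs.length then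
    if hcm : inq = false ∧ cs[i] = '/' ∧ i + 1 < cs.length ∧
        (cs.getD (i + 1) ' ' = '/' ∨ cs.getD (i + 1) ' ' = '*') then
      if cs.getD (i + 1) ' ' = '/' then
        aLoop cs (skipNL cs i) inq brace cur items
      else
        aLoop cs (skipBC cs (i + 2) + 1) inq brace cur items
    else if cs[i] = '"' ∧ (i = 0 ∨ cs.getD (i - 1) ' ' ≠ '\\') then
      aLoop cs (i + 1) (!inq) brace (cur ++ [cs[i]]) items
    else if inq = false ∧ cs[i] = '{' then
      aLoop cs (i + 1) inq (brace + 1) (cur ++ [cs[i]]) items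
    else if inq = false ∧ cs[i] = '}' then
      aLoop cs (i + 1) inq (brace - 1) (cur ++ [cs[i]]) items
    else if inq = false ∧ cs[i] = ',' ∧ brace = 0 then
      aLoop cs (i + 1) inq brace []
        (if PySem.Chars.strip cur ≠ [] ∧ PySem.Chars.strIsspace (PySem.Chars.strip cur) = false
         then items ++ [PySem.Chars.strip cur] else items)
    else
      aLoop cs (i + 1) inq brace (cur ++ [cs[i]]) items
  else (items, cur)
termination_by cs.length - i
decreasing_by
  · have := skipNL_gt cs i h (by have h2 : cs[i] = '/' := hcm.2.1; rw [h2]; decide)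
    omega
  · have := skipBC_ge cs (i + 2)
    omega
  all_goals omega

def parse_array_items_py (content : String) : List String :=
  let cs := content.toList
  let r := aLoop cs 0 false 0 [] []
  let items2 :=
    if r.2 ≠ [] then
      let item := PySem.Chars.strip r.2
      if item ≠ [] ∧ PySem.Chars.strIsspace item = false ∧
          PySem.Chars.endswith item [','] = false then
        r.1 ++ [item]
      else r.1
    else r.1
  (items2.filterMap (fun it =>
    let v := PySem.Chars.strip (rstripComma it)
    if v = [] then none else some v)).map String.ofList

-- ===== PORT B =====

-- pass 1: drop comments, annotate every surviving char with in_quotes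
def bLex (cs : List Char) (i : Nat) (inq : Bool) : List (Char × Bool) :=
  if h : i < cs.length then
    if hcm : inq = false ∧ cs[i] = '/' ∧ i + 1 < cs.length ∧
        (cs.getD (i + 1) ' ' = '/' ∨ cs.getD (i + 1) ' ' = '*') then
      if cs.getD (i + 1) ' ' = '/' then
        bLex cs (skipNL cs i) inq
      else
        bLex cs (skipBC cs (i + 2) + 1) inq
    else
      (cs[i], if cs[i] = '"' ∧ (i = 0 ∨ cs.getD (i - 1) ' ' ≠ '\\') then !inq else inq) ::
        bLex cs (i + 1) (if cs[i] = '"' ∧ (i = 0 ∨ cs.getD (i - 1) ' ' ≠ '\\') then !inq else inq)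
  else []
termination_by cs.length - i
decreasing_by
  · have := skipNL_gt cs i h (by have h2 : cs[i] = '/' := hcm.2.1; rw [h2]; decide)
    omega
  · have := skipBC_ge cs (i + 2)
    omega
  · omega

-- pass 2: one step of the splitting fold (state: pieces, current piece, brace level)
def bStep (st : List (List Char) × List Char × Int) (cq : Char × Bool) :
    List (List Char) × List Char × Int :=
  if cq.2 = false ∧ cq.1 = '{' then (st.1, st.2.1 ++ [cq.1], st.2.2 + 1)
  else if cq.2 = false ∧ cq.1 = '}' then (st.1, st.2.1 ++ [cq.1], st.2.2 - 1)
  else if cq.2 = false ∧ cq.1 = ',' ∧ st.2.2 = 0 then (st.1 ++ [st.2.1], [], st.2.2)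
  else (st.1, st.2.1 ++ [cq.1], st.2.2)

def parse_array_items_py_alt (content : String) : List String :=
  let cs := content.toList
  let st := (bLex cs 0 false).foldl bStep ([], [], 0)
  let items := st.1.filterMap (fun p =>
    let s := PySem.Chars.strip p
    if s = [] then none else some s)
  let last := PySem.Chars.strip st.2.1
  let items2 := if last ≠ [] ∧ PySem.Chars.endswith last [','] = false then items ++ [last] else items
  (items2.filterMap (fun it =>
    let v := PySem.Chars.strip (rstripComma it)
    if v = [] then none else some v)).map String.ofList

-- ===== PRECONDITION & SPEC =====
def Spec_parse_array_items_py (content : String) (out : List String) : Prop := out = parse_array_items_py_alt content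
instance (content : String) (out : List String) : Decidable (Spec_parse_array_items_py content out) := by unfold Spec_parse_array_items_py; infer_instance

-- ===== CLAIM (what is proved, stated in full; the proofs are below) =====
def Claim_equal_parse_array_items_py : Prop := ∀ (content : String), Dom_parse_array_items_py content → Spec_parse_array_items_py content (parse_array_items_py content)

-- ===== LEMMAS AND PROOFS =====

lemma dropWhile_cons_head (p : Char → Bool) (s : List Char) (a : Char) (tl : List Char)
    (h : List.dropWhile p s = a :: tl) : p a = false := by
  have hne : List.dropWhile p s ≠ [] := by simp [h]
  have := List.head_dropWhile_not p hne
  simp only [h, List.head_cons] at this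
  exact this

-- a nonempty stripped string is never all-whitespace
lemma strip_not_isspace (s : List Char) (h : PySem.Chars.strip s ≠ []) :
    PySem.Chars.strIsspace (PySem.Chars.strip s) = false := by
  unfold PySem.Chars.strip PySem.Chars.rstrip PySem.Chars.lstrip at *
  set u := List.dropWhile PySem.Chars.isspace s with hu
  set t := (List.dropWhile PySem.Chars.isspace u.reverse).reverse with ht
  have hpre : t <+: u := by
    rw [ht]
    have hsuf : List.dropWhile PySem.Chars.isspace u.reverse <:+ u.reverse := List.dropWhile_suffix _
    have := List.reverse_prefix.mpr (by simpa using hsuf)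
    simpa using this
  rcases hth : t with _ | ⟨a, tl⟩
  · exact absurd hth h
  · obtain ⟨r, hr⟩ := hpre
    have hau : u = a :: (tl ++ r) := by rw [← hr, hth]; simp
    have ha : PySem.Chars.isspace a = false := dropWhile_cons_head _ s a (tl ++ r) (by rw [← hu, hau])
    unfold PySem.Chars.strIsspace
    simp [List.all_cons, ha]

def cleanPiece (p : List Char) : Option (List Char) :=
  let s := PySem.Chars.strip p
  if s = [] then none else some s

-- bStep only ever appends to the pieces component
lemma bStep_prefix_one (p₀ : List (List Char)) (cur : List Char) (brace : Int) (x : Char × Bool) :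
    bStep (p₀, cur, brace) x =
      (p₀ ++ (bStep ([], cur, brace) x).1, (bStep ([], cur, brace) x).2) := by
  unfold bStep; dsimp only; split_ifs <;> simp

lemma bStep_prefix (l : List (Char × Bool)) :
    ∀ (p₀ : List (List Char)) (cur : List Char) (brace : Int),
      l.foldl bStep (p₀, cur, brace) =
        (p₀ ++ (l.foldl bStep ([], cur, brace)).1, (l.foldl bStep ([], cur, brace)).2) := by
  induction l with
  | nil => intro p₀ cur brace; simp
  | cons x l ih =>
    intro p₀ cur brace
    simp only [List.foldl_cons]
    rw [bStep_prefix_one]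
    rcases hx : bStep ([], cur, brace) x with ⟨π, c', b'⟩
    rw [ih (p₀ ++ π) c' b', ih π c' b']
    simp

lemma bStep_open (p : List (List Char)) (cur : List Char) (brace : Int) (c : Char) (q : Bool)
    (h : q = false ∧ c = '{') : bStep (p, cur, brace) (c, q) = (p, cur ++ [c], brace + 1) := by
  unfold bStep; dsimp only; rw [if_pos h]

lemma bStep_close (p : List (List Char)) (cur : List Char) (brace : Int) (c : Char) (q : Bool)
    (h1 : ¬(q = false ∧ c = '{')) (h : q = false ∧ c = '}') :
    bStep (p, cur, brace) (c, q) = (p, cur ++ [c], brace - 1) := by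
  unfold bStep; dsimp only; rw [if_neg h1, if_pos h]

lemma bStep_comma (p : List (List Char)) (cur : List Char) (brace : Int) (c : Char) (q : Bool)
    (h1 : ¬(q = false ∧ c = '{')) (h2 : ¬(q = false ∧ c = '}'))
    (h : q = false ∧ c = ',' ∧ brace = 0) :
    bStep (p, cur, brace) (c, q) = (p ++ [cur], [], brace) := by
  unfold bStep; dsimp only; rw [if_neg h1, if_neg h2, if_pos h]

lemma bStep_other (p : List (List Char)) (cur : List Char) (brace : Int) (c : Char) (q : Bool)
    (h1 : ¬(q = false ∧ c = '{')) (h2 : ¬(q = false ∧ c = '}'))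
    (h3 : ¬(q = false ∧ c = ',' ∧ brace = 0)) :
    bStep (p, cur, brace) (c, q) = (p, cur ++ [c], brace) := by
  unfold bStep; dsimp only; rw [if_neg h1, if_neg h2, if_neg h3]

lemma loop_eq (cs : List Char) : ∀ (k i : Nat), cs.length - i ≤ k → ∀ (inq : Bool) (brace : Int)
    (cur : List Char) (items : List (List Char)),
    aLoop cs i inq brace cur items =
      (items ++ (((bLex cs i inq).foldl bStep ([], cur, brace)).1).filterMap cleanPiece,
       ((bLex cs i inq).foldl bStep ([], cur, brace)).2.1) := by
  intro k
  induction k with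
  | zero =>
    intro i hk inq brace cur items
    have h : ¬ i < cs.length := by omega
    rw [aLoop, bLex]
    simp [h]
  | succ k ih =>
    intro i hk inq brace cur items
    rw [aLoop, bLex]
    by_cases h : i < cs.length
    · simp only [dif_pos h]
      by_cases hcm : inq = false ∧ cs[i] = '/' ∧ i + 1 < cs.length ∧
          (cs.getD (i + 1) ' ' = '/' ∨ cs.getD (i + 1) ' ' = '*')
      · simp only [dif_pos hcm]
        by_cases hsl : cs.getD (i + 1) ' ' = '/'
        · simp only [if_pos hsl]
          exact ih (skipNL cs i)
            (by have h2 : cs[i] = '/' := hcm.2.1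
                have := skipNL_gt cs i h (by rw [h2]; decide); omega) inq brace cur items
        · simp only [if_neg hsl]
          exact ih (skipBC cs (i + 2) + 1) (by have := skipBC_ge cs (i + 2); omega) inq brace cur items
      · simp only [dif_neg hcm, List.foldl_cons]
        by_cases hq : cs[i] = '"' ∧ (i = 0 ∨ cs.getD (i - 1) ' ' ≠ '\\')
        · simp only [if_pos hq]
          rw [bStep_other _ _ _ _ _ (by simp [hq.1]) (by simp [hq.1]) (by simp [hq.1]),
            ih (i + 1) (by omega)]
        · simp only [if_neg hq]
          by_cases h1 : inq = false ∧ cs[i] = '{'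
          · simp only [if_pos h1]
            rw [bStep_open _ _ _ _ _ h1, ih (i + 1) (by omega)]
          · simp only [if_neg h1]
            by_cases h2 : inq = false ∧ cs[i] = '}'
            · simp only [if_pos h2]
              rw [bStep_close _ _ _ _ _ h1 h2, ih (i + 1) (by omega)]
            · simp only [if_neg h2]
              by_cases h3 : inq = false ∧ cs[i] = ',' ∧ brace = 0
              · simp only [if_pos h3]
                rw [bStep_comma _ _ _ _ _ h1 h2 h3, List.nil_append,
                  bStep_prefix _ [cur], ih (i + 1) (by omega)]
                by_cases hs : PySem.Chars.strip cur = []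
                · simp [hs, cleanPiece]
                · simp [hs, strip_not_isspace cur hs, cleanPiece]
              · simp only [if_neg h3]
                rw [bStep_other _ _ _ _ _ h1 h2 h3, ih (i + 1) (by omega)]
    · simp [dif_neg h]

-- ===== VERDICT (by name: the statement is the Claim_ definition above) =====
theorem parse_array_items_py_spec : Claim_equal_parse_array_items_py := by
  intro content _
  unfold Spec_parse_array_items_py
  simp only [parse_array_items_py, parse_array_items_py_alt]
  rw [loop_eq content.toList content.toList.length 0 (by omega) false 0 [] []]
  simp only [cleanPiece, List.nil_append]
  rcases hst : (bLex content.toList 0 false).foldl bStep ([], [], 0) with ⟨P, C, B⟩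
  dsimp only
  by_cases hC : C = []
  · subst hC
    simp [PySem.Chars.strip, PySem.Chars.lstrip, PySem.Chars.rstrip]
  · by_cases hs : PySem.Chars.strip C = []
    · simp [hC, hs]
    · simp [hC, hs, strip_not_isspace C hs]
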